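-- pv_equiv track=rewrite | github.com/InduChaurasia/P_AOC_2024 | src/__2025__/day4.py | accessible_roll
-- ===== SOURCE A (Python) =====
-- def accessible_roll(grid:list[list[str]]) -> list[int]:
--
--     r,c=len(grid),len(grid[0])
--     directions=[(0,1),(1,0),(-1,0),(0,-1),(1,1),(-1,-1),(1,-1),(-1,1)]
--     def is_valid_index(x:int,y:int)->bool:
--             return 0<=x<r and 0<=y<c
--     accessible=[]
--     for i in range(r):
--         for j in range(c):
--             if grid[i][j]=='.':
--                  continue
--             neighbours=0
--             for dx,dy in directions:
--                 x,y=i+dx,j+dy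
--                 if is_valid_index(x,y) and grid[x][y]=='@':
--                     neighbours+=1
--             if neighbours<4:
--                 accessible.append((i,j))
--     return accessible
-- ===== SOURCE B (Python) =====
-- OFFS = [(-1, -1), (-1, 0), (-1, 1), (0, -1), (0, 1), (1, -1), (1, 0), (1, 1)]
--
--
-- def accessible_roll(grid: list[list[str]]) -> list[int]:
--     # Scatter pass: each '@' cell adds 1 to the count of its in-bounds neighbours.
--     r, c = len(grid), len(grid[0])
--     count = {}
--     for x in range(r):
--         for y in range(c):
--             if grid[x][y] == '@':
--                 for nb in [(x + dx, y + dy) for dx, dy in OFFS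
--                            if 0 <= x + dx < r and 0 <= y + dy < c]:
--                     count[nb] = count.get(nb, 0) + 1
--     # Gather pass: non-dot cells with fewer than 4 '@' neighbours.
--     return [(i, j) for i in range(r) for j in range(c)
--             if grid[i][j] != '.' and count.get((i, j), 0) < 4]
-- ===== Notes on version B (the rewrite author's own statement) =====
-- stated objective: alternative
-- what changed: Replaces A's per-cell gather loop over the 8 directions by a scatter pass (each '@' cell increments a dict counter for its in-bounds neighbours) followed by a comprehension collecting non-dot cells whose counter is below 4.
import Mathlib
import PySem

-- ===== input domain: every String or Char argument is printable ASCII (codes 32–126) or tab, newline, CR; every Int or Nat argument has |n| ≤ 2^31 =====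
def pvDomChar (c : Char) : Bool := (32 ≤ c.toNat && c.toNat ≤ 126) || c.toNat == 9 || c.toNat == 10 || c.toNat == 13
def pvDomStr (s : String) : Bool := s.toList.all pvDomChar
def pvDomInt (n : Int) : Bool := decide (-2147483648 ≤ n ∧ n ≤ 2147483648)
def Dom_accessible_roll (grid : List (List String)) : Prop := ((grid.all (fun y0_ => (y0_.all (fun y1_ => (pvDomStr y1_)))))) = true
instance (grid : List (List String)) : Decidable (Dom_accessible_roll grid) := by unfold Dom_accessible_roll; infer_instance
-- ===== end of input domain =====

-- B replaces A's per-cell gather over the 8 directions by a scatter pass (each '@' cell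
-- increments a counter for its in-bounds neighbours) followed by a collection pass.

-- ===== PORT A =====
def pvDirs : List (Int × Int) := [(0,1),(1,0),(-1,0),(0,-1),(1,1),(-1,-1),(1,-1),(-1,1)]

def accessible_roll (grid : List (List String)) : List (Int × Int) :=
  let r : Int := grid.length
  let c : Int := (PySem.List.pyGetD grid 0 []).length
  let isValid : Int → Int → Bool := fun x y =>
    decide (0 ≤ x) && decide (x < r) && decide (0 ≤ y) && decide (y < c)
  (PySem.List.pyRange 0 r 1).foldl (fun acc i =>
    (PySem.List.pyRange 0 c 1).foldl (fun acc j =>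
      if PySem.List.pyGetD (PySem.List.pyGetD grid i []) j "" = "." then acc
      else
        let neighbours : Int := pvDirs.foldl (fun n d =>
          if isValid (i + d.1) (j + d.2) &&
             decide (PySem.List.pyGetD (PySem.List.pyGetD grid (i + d.1) []) (j + d.2) "" = "@")
          then n + 1 else n) 0
        if neighbours < 4 then acc ++ [(i, j)] else acc) acc) []

-- ===== PORT B =====
def pvOffs : List (Int × Int) := [(-1,-1),(-1,0),(-1,1),(0,-1),(0,1),(1,-1),(1,0),(1,1)]

def accessible_roll_alt (grid : List (List String)) : List (Int × Int) :=
  let r : Int := grid.length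
  let c : Int := (PySem.List.pyGetD grid 0 []).length
  let count : PySem.Dict (Int × Int) Int :=
    (PySem.List.pyRange 0 r 1).foldl (fun d x =>
      (PySem.List.pyRange 0 c 1).foldl (fun d y =>
        if PySem.List.pyGetD (PySem.List.pyGetD grid x []) y "" = "@" then
          ((pvOffs.filter (fun o =>
              decide (0 ≤ x + o.1) && decide (x + o.1 < r) &&
              decide (0 ≤ y + o.2) && decide (y + o.2 < c))).map
            (fun o => (x + o.1, y + o.2))).foldl
            (fun d k => d.insert k (d.getD k 0 + 1)) d
        else d) d) PySem.Dict.empty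
  (PySem.List.pyRange 0 r 1).flatMap (fun i =>
    ((PySem.List.pyRange 0 c 1).filter (fun j =>
      decide (PySem.List.pyGetD (PySem.List.pyGetD grid i []) j "" ≠ ".") &&
      decide (count.getD (i, j) 0 < 4))).map (fun j => (i, j)))

-- ===== PRECONDITION & SPEC =====
-- Pre_ excludes exactly the inputs on which Python A raises IndexError: the empty grid
-- (grid[0]) and grids with a row shorter than the first row (grid[i][j] for j < c).
def Pre_accessible_roll (grid : List (List String)) : Prop :=
  grid ≠ [] ∧ ∀ row ∈ grid, (PySem.List.pyGetD grid 0 []).length ≤ row.length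
instance (grid : List (List String)) : Decidable (Pre_accessible_roll grid) := by
  unfold Pre_accessible_roll; infer_instance

def pvWitness_accessible_roll : List (List String) := [["@", "."], [".", "x"]]

def Spec_accessible_roll (grid : List (List String)) (out : List (Int × Int)) : Prop := out = accessible_roll_alt grid
instance (grid : List (List String)) (out : List (Int × Int)) : Decidable (Spec_accessible_roll grid out) := by unfold Spec_accessible_roll; infer_instance

-- ===== CLAIM (what is proved, stated in full; the proofs are below) =====
def Claim_equal_accessible_roll : Prop := ∀ (grid : List (List String)), Dom_accessible_roll grid → Pre_accessible_roll grid → Spec_accessible_roll grid (accessible_roll grid)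

-- ===== LEMMAS AND PROOFS =====

-- abbreviations used only in the proofs
def pvCell (grid : List (List String)) (x y : Int) : String :=
  PySem.List.pyGetD (PySem.List.pyGetD grid x []) y ""

def pvInb (r c x y : Int) : Bool :=
  decide (0 ≤ x) && decide (x < r) && decide (0 ≤ y) && decide (y < c)

def pvG (grid : List (List String)) (r c x y : Int) : List (Int × Int) :=
  if pvCell grid x y = "@" then
    ((pvOffs.filter (fun o => pvInb r c (x + o.1) (y + o.2))).map (fun o => (x + o.1, y + o.2)))
  else []

def pvM (grid : List (List String)) (r c : Int) : List (Int × Int) :=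
  (PySem.List.pyRange 0 r 1).flatMap (fun x =>
    (PySem.List.pyRange 0 c 1).flatMap (fun y => pvG grid r c x y))

def pvNA (grid : List (List String)) (r c i j : Int) : Nat :=
  pvDirs.countP (fun d =>
    pvInb r c (i + d.1) (j + d.2) && decide (pvCell grid (i + d.1) (j + d.2) = "@"))

-- one row of the scatter pass
lemma pv_scatter_row (g : Int → List (Int × Int)) (l : List Int)
    (d : PySem.Dict (Int × Int) Int) (v : Int × Int) :
    (l.foldl (fun d y => (g y).foldl (fun d k => d.insert k (d.getD k 0 + 1)) d) d).getD v 0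
      = d.getD v 0 + ((l.flatMap g).count v : Int) := by
  induction l generalizing d with
  | nil => simp
  | cons a t ih =>
    rw [List.foldl_cons, ih, PySem.Dict.getD_foldl_insert_add_one]
    simp [List.count_append]; ring

-- the whole scatter pass
lemma pv_scatter2 (g : Int → Int → List (Int × Int)) (l1 l2 : List Int)
    (d : PySem.Dict (Int × Int) Int) (v : Int × Int) :
    (l1.foldl (fun d x => l2.foldl (fun d y =>
        (g x y).foldl (fun d k => d.insert k (d.getD k 0 + 1)) d) d) d).getD v 0
      = d.getD v 0 + ((l1.flatMap (fun x => l2.flatMap (g x))).count v : Int) := by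
  induction l1 generalizing d with
  | nil => simp
  | cons a t ih =>
    rw [List.foldl_cons, ih, pv_scatter_row]
    simp [List.count_append]; ring

lemma pv_countP_eq_sum {α : Type} (l : List α) (p : α → Bool) :
    l.countP p = (l.map (fun a => if p a then 1 else 0)).sum := by
  induction l with
  | nil => simp
  | cons a t ih => by_cases h : p a <;> simp [h, ih] <;> omega

lemma pv_sum_swap {α β : Type} (l1 : List α) (l2 : List β) (f : α → β → Nat) :
    (l1.map (fun x => (l2.map (f x)).sum)).sum
      = (l2.map (fun y => (l1.map (fun x => f x y)).sum)).sum := by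
  induction l1 with
  | nil =>
    simp only [List.map_nil, List.sum_nil]
    symm; apply List.sum_eq_zero; intro x hx
    rcases List.mem_map.mp hx with ⟨y, hy, rfl⟩; simp
  | cons a t ih =>
    simp only [List.map_cons, List.sum_cons, ih, ← List.sum_map_add]

lemma pv_sum_point (l : List Int) (hl : l.Nodup) (t : Int) (h : Int → Nat) :
    (l.map (fun x => if x = t then h x else 0)).sum = if t ∈ l then h t else 0 := by
  induction l with
  | nil => simp
  | cons a s ih =>
    rcases List.nodup_cons.mp hl with ⟨ha, hs⟩
    by_cases hat : a = t
    · subst hat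
      have : (s.map (fun x => if x = a then h x else 0)).sum = 0 := by
        apply List.sum_eq_zero; intro x hx
        rcases List.mem_map.mp hx with ⟨y, hy, rfl⟩
        have : ¬ y = a := fun hya => ha (hya ▸ hy)
        simp [this]
      simp [this]
    · simp only [List.map_cons, List.sum_cons, if_neg hat, ih hs, List.mem_cons]
      have : ¬ t = a := fun h' => hat h'.symm
      simp [this]

lemma pv_sum_congr {α : Type} (l : List α) (f g : α → Nat) (h : ∀ a ∈ l, f a = g a) :
    (l.map f).sum = (l.map g).sum := by rw [List.map_congr_left h]

-- per-cell count of the scatter list, re-expressed over A's direction list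
lemma pv_g_count (grid : List (List String)) (r c i j x y : Int)
    (hi : 0 ≤ i) (hir : i < r) (hj : 0 ≤ j) (hjc : j < c) :
    (pvG grid r c x y).count (i, j)
      = (pvDirs.map (fun e =>
          if x = i + e.1 ∧ y = j + e.2 ∧ pvCell grid x y = "@" then 1 else 0)).sum := by
  by_cases hc : pvCell grid x y = "@"
  · unfold pvG
    rw [if_pos hc, List.count_eq_countP, List.countP_map, List.countP_filter]
    have hperm : (pvDirs.map (fun e : Int × Int => (-e.1, -e.2))).Perm pvOffs := by decide
    rw [← hperm.countP_eq, List.countP_map, pv_countP_eq_sum]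
    apply pv_sum_congr
    intro e _
    by_cases h : x = i + e.1 ∧ y = j + e.2
    · obtain ⟨rfl, rfl⟩ := h
      have h1 : i + e.1 + -e.1 = i := by ring
      have h2 : j + e.2 + -e.2 = j := by ring
      simp [Function.comp, h1, h2, pvInb, hi, hir, hj, hjc, hc]
    · have hne : ¬(x + -e.1 = i ∧ y + -e.2 = j) := by omega
      have hne' : ¬(x = i + e.1 ∧ y = j + e.2 ∧ pvCell grid x y = "@") := by tauto
      simp only [Function.comp, if_neg hne']
      rw [if_neg]
      intro hco
      rw [Bool.and_eq_true, beq_iff_eq, Prod.mk.injEq] at hco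
      exact hne hco.1
  · unfold pvG
    rw [if_neg hc]
    simp only [List.count_nil]
    symm; apply List.sum_eq_zero; intro v hv
    rcases List.mem_map.mp hv with ⟨e, _, rfl⟩
    have : ¬(x = i + e.1 ∧ y = j + e.2 ∧ pvCell grid x y = "@") := by tauto
    simp [this]

-- counting the scatter multiset at an in-bounds cell gives the gather count
lemma pv_countM (grid : List (List String)) (r c i j : Int)
    (hi : 0 ≤ i) (hir : i < r) (hj : 0 ≤ j) (hjc : j < c) :
    (pvM grid r c).count (i, j) = pvNA grid r c i j := by
  unfold pvM
  rw [List.count_flatMap]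
  have step1 : ((PySem.List.pyRange 0 r 1).map
        (List.count (i, j) ∘ fun x => (PySem.List.pyRange 0 c 1).flatMap (fun y => pvG grid r c x y))).sum
      = ((PySem.List.pyRange 0 r 1).map (fun x =>
          ((PySem.List.pyRange 0 c 1).map (fun y =>
            ((pvDirs.map (fun e =>
              if x = i + e.1 ∧ y = j + e.2 ∧ pvCell grid x y = "@" then (1:Nat) else 0)).sum))).sum)).sum := by
    apply pv_sum_congr; intro x _
    simp only [Function.comp]
    rw [List.count_flatMap]
    apply pv_sum_congr; intro y _
    simp only [Function.comp]
    exact pv_g_count grid r c i j x y hi hir hj hjc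
  rw [step1]
  -- swap the direction sum outside the y-sum, then outside the x-sum
  have step2 : ∀ x : Int, ((PySem.List.pyRange 0 c 1).map (fun y =>
        ((pvDirs.map (fun e =>
          if x = i + e.1 ∧ y = j + e.2 ∧ pvCell grid x y = "@" then (1:Nat) else 0)).sum))).sum
      = (pvDirs.map (fun e =>
          ((PySem.List.pyRange 0 c 1).map (fun y =>
            if x = i + e.1 ∧ y = j + e.2 ∧ pvCell grid x y = "@" then (1:Nat) else 0)).sum)).sum := by
    intro x
    exact pv_sum_swap (PySem.List.pyRange 0 c 1) pvDirs
      (fun y e => if x = i + e.1 ∧ y = j + e.2 ∧ pvCell grid x y = "@" then (1:Nat) else 0)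
  have step2' := pv_sum_congr (PySem.List.pyRange 0 r 1) _ _ (fun x _ => step2 x)
  rw [step2']
  rw [pv_sum_swap (PySem.List.pyRange 0 r 1) pvDirs]
  -- collapse the two point sums, one direction at a time
  unfold pvNA
  rw [pv_countP_eq_sum]
  apply pv_sum_congr
  intro e _
  -- inner sum over y
  have hy : ∀ x : Int, ((PySem.List.pyRange 0 c 1).map (fun y =>
        if x = i + e.1 ∧ y = j + e.2 ∧ pvCell grid x y = "@" then (1:Nat) else 0)).sum
      = (if j + e.2 ∈ PySem.List.pyRange 0 c 1 then
          (if x = i + e.1 ∧ pvCell grid x (j + e.2) = "@" then (1:Nat) else 0) else 0) := by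
    intro x
    rw [← pv_sum_point (PySem.List.pyRange 0 c 1) (PySem.List.nodup_pyRange_one 0 c) (j + e.2)
        (fun y => if x = i + e.1 ∧ pvCell grid x y = "@" then (1:Nat) else 0)]
    apply pv_sum_congr
    intro y _
    by_cases hb : y = j + e.2
    · subst hb
      by_cases h : x = i + e.1 ∧ pvCell grid x (j + e.2) = "@" <;> simp [h]
    · have hne : ¬(x = i + e.1 ∧ y = j + e.2 ∧ pvCell grid x y = "@") := by tauto
      simp [hb]
  have hx := pv_sum_congr (PySem.List.pyRange 0 r 1) _ _ (fun x _ => hy x)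
  rw [hx]
  -- outer sum over x
  have hpt : ((PySem.List.pyRange 0 r 1).map (fun x =>
        if j + e.2 ∈ PySem.List.pyRange 0 c 1 then
          (if x = i + e.1 ∧ pvCell grid x (j + e.2) = "@" then (1:Nat) else 0) else 0)).sum
      = ((PySem.List.pyRange 0 r 1).map (fun x =>
          if x = i + e.1 then
            (if (j + e.2 ∈ PySem.List.pyRange 0 c 1) ∧ pvCell grid x (j + e.2) = "@" then (1:Nat) else 0)
          else 0)).sum := by
    apply pv_sum_congr
    intro x _
    by_cases hb : x = i + e.1
    · by_cases hm : j + e.2 ∈ PySem.List.pyRange 0 c 1 <;>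
        by_cases hcx : pvCell grid x (j + e.2) = "@" <;> simp [hb, hm]
    · by_cases hm : j + e.2 ∈ PySem.List.pyRange 0 c 1 <;> simp [hm, hb]
  rw [hpt, pv_sum_point (PySem.List.pyRange 0 r 1) (PySem.List.nodup_pyRange_one 0 r) (i + e.1)
      (fun x => if (j + e.2 ∈ PySem.List.pyRange 0 c 1) ∧ pvCell grid x (j + e.2) = "@" then (1:Nat) else 0)]
  -- identify the membership tests with the bounds checks
  simp only [PySem.List.mem_pyRange_one, pvInb]
  by_cases h1 : 0 ≤ i + e.1 <;> by_cases h2 : i + e.1 < r <;>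
    by_cases h3 : 0 ≤ j + e.2 <;> by_cases h4 : j + e.2 < c <;>
      by_cases h5 : pvCell grid (i + e.1) (j + e.2) = "@" <;>
        simp [h1, h2, h3, h4, h5]

-- A's inner gather loop, and B's scatter dict, restated
def pvNbInt (grid : List (List String)) (r c i j : Int) : Int :=
  pvDirs.foldl (fun n d =>
    if pvInb r c (i + d.1) (j + d.2) && decide (pvCell grid (i + d.1) (j + d.2) = "@")
    then n + 1 else n) 0

def pvCnt (grid : List (List String)) (r c : Int) : PySem.Dict (Int × Int) Int :=
  (PySem.List.pyRange 0 r 1).foldl (fun d x =>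
    (PySem.List.pyRange 0 c 1).foldl (fun d y =>
      if pvCell grid x y = "@" then
        ((pvOffs.filter (fun o => pvInb r c (x + o.1) (y + o.2))).map
          (fun o => (x + o.1, y + o.2))).foldl
          (fun d k => d.insert k (d.getD k 0 + 1)) d
      else d) d) PySem.Dict.empty

lemma pv_cnt_getD (grid : List (List String)) (r c : Int) (v : Int × Int) :
    (pvCnt grid r c).getD v 0 = ((pvM grid r c).count v : Int) := by
  unfold pvCnt
  have hfun : (fun (d : PySem.Dict (Int × Int) Int) (x : Int) =>
        (PySem.List.pyRange 0 c 1).foldl (fun d y =>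
          if pvCell grid x y = "@" then
            ((pvOffs.filter (fun o => pvInb r c (x + o.1) (y + o.2))).map
              (fun o => (x + o.1, y + o.2))).foldl
              (fun d k => d.insert k (d.getD k 0 + 1)) d
          else d) d)
      = (fun d x => (PySem.List.pyRange 0 c 1).foldl (fun d y =>
          (pvG grid r c x y).foldl (fun d k => d.insert k (d.getD k 0 + 1)) d) d) := by
    funext d x
    congr 1
    funext d y
    by_cases h : pvCell grid x y = "@" <;> simp [pvG, h]
  rw [hfun, pv_scatter2]
  simp [pvM]

lemma pv_nb (grid : List (List String)) (r c i j : Int) :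
    pvNbInt grid r c i j = ((pvNA grid r c i j : Nat) : Int) := by
  unfold pvNbInt pvNA
  rw [PySem.List.foldl_count_if]
  simp

-- the common shape of the two programs, for arbitrary bounds r and c
lemma pv_shape (grid : List (List String)) (r c : Int) :
    (PySem.List.pyRange 0 r 1).foldl (fun acc i =>
      (PySem.List.pyRange 0 c 1).foldl (fun acc j =>
        if pvCell grid i j = "." then acc
        else if pvNbInt grid r c i j < 4 then acc ++ [(i, j)] else acc) acc) []
    = (PySem.List.pyRange 0 r 1).flatMap (fun i =>
      ((PySem.List.pyRange 0 c 1).filter (fun j =>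
        decide (pvCell grid i j ≠ ".") &&
        decide ((pvCnt grid r c).getD (i, j) 0 < 4))).map (fun j => (i, j))) := by
  have h1 : ∀ i : Int, (fun (acc : List (Int × Int)) (j : Int) =>
        if pvCell grid i j = "." then acc
        else if pvNbInt grid r c i j < 4 then acc ++ [(i, j)] else acc)
      = (fun acc j =>
        if (decide (pvCell grid i j ≠ ".") && decide (pvNbInt grid r c i j < 4)) then
          acc ++ [(i, j)] else acc) := by
    intro i; funext acc j
    by_cases hd : pvCell grid i j = "." <;> by_cases hn : pvNbInt grid r c i j < 4 <;>
      simp [hd, hn]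
  have h2 : (fun (acc : List (Int × Int)) (i : Int) =>
        (PySem.List.pyRange 0 c 1).foldl (fun acc j =>
          if pvCell grid i j = "." then acc
          else if pvNbInt grid r c i j < 4 then acc ++ [(i, j)] else acc) acc)
      = (fun acc i => acc ++ ((PySem.List.pyRange 0 c 1).filter (fun j =>
          decide (pvCell grid i j ≠ ".") && decide (pvNbInt grid r c i j < 4))).map
            (fun j => (i, j))) := by
    funext acc i
    rw [h1 i]
    exact PySem.List.foldl_append_if _ _ _ _
  rw [h2, PySem.List.foldl_append_eq_flatMap, List.nil_append]
  apply List.flatMap_congr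
  intro i hi
  congr 1
  apply List.filter_congr
  intro j hj
  rcases PySem.List.mem_pyRange_one.mp hi with ⟨hi0, hir⟩
  rcases PySem.List.mem_pyRange_one.mp hj with ⟨hj0, hjc⟩
  rw [pv_nb, pv_cnt_getD, pv_countM grid r c i j hi0 hir hj0 hjc]

-- A's and B's programs agree everywhere (both ports are total)
lemma pv_main (grid : List (List String)) :
    accessible_roll grid = accessible_roll_alt grid := by
  have hA : accessible_roll grid
      = (PySem.List.pyRange 0 (grid.length : Int) 1).foldl (fun acc i =>
          (PySem.List.pyRange 0 ((PySem.List.pyGetD grid 0 []).length : Int) 1).foldl (fun acc j =>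
            if pvCell grid i j = "." then acc
            else if pvNbInt grid (grid.length : Int) ((PySem.List.pyGetD grid 0 []).length : Int) i j < 4
                 then acc ++ [(i, j)] else acc) acc) [] := rfl
  have hB : accessible_roll_alt grid
      = (PySem.List.pyRange 0 (grid.length : Int) 1).flatMap (fun i =>
          ((PySem.List.pyRange 0 ((PySem.List.pyGetD grid 0 []).length : Int) 1).filter (fun j =>
            decide (pvCell grid i j ≠ ".") &&
            decide ((pvCnt grid (grid.length : Int) ((PySem.List.pyGetD grid 0 []).length : Int)).getD (i, j) 0 < 4))).map
              (fun j => (i, j))) := rfl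
  rw [hA, hB]
  exact pv_shape grid _ _

-- ===== VERDICT (by name: the statement is the Claim_ definition above) =====
theorem accessible_roll_spec : Claim_equal_accessible_roll := by
  intro grid _ _
  unfold Spec_accessible_roll
  exact pv_main grid
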